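-- pv_equiv track=rewrite | github.com/ZhuChongjing/CodeVideoRenderer | CodeVideoRenderer/renderer/CameraFollowCursorCVR.py | strip_empty_lines
-- ===== SOURCE A (Python) =====
-- def strip_empty_lines(text: str):
--     """
--     Remove empty lines from the beginning and end of a string.
--     """
--     lines = text.split("\n")
--
--     start = 0
--     while start < len(lines) and lines[start].strip() == '':
--         start += 1
--
--     end = len(lines)
--     while end > start and lines[end - 1].strip() == '':
--         end -= 1
--
--     return '\n'.join(lines[start:end])
-- ===== SOURCE B (Python) =====
-- from itertools import dropwhile
--
-- def strip_empty_lines(text: str):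
--     """
--     Remove empty lines from the beginning and end of a string.
--     """
--     def drop_blank(ls):
--         return list(dropwhile(lambda s: s.strip() == '', ls))
--     # drop trailing blanks by dropping leading blanks of the reversed list,
--     # then drop leading blanks of the result
--     lines = drop_blank(drop_blank(text.split("\n")[::-1])[::-1])
--     return '\n'.join(lines)
-- ===== Notes on version B (the rewrite author's own statement) =====
-- stated objective: idiomatic
-- what changed: Replaces the two index-based while-loop pointer scans and the slice by itertools.dropwhile applied around a double reversal (drop trailing blanks via dropwhile on the reversed list, then drop leading blanks), with no index arithmetic.
import Mathlib
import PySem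

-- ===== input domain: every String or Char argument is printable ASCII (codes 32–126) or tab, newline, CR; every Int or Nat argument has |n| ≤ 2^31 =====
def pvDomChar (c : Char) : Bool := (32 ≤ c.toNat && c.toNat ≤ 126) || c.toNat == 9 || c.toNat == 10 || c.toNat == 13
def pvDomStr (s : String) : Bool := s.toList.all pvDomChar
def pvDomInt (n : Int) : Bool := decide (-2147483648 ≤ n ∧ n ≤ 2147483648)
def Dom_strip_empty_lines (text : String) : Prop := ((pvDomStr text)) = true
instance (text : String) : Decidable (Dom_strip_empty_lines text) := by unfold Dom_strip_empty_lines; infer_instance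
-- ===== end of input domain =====

-- B replaces A's two index-based while-loop pointer scans and slice by dropWhile applied
-- around a double reversal (idiomatic, no index arithmetic); same O(n) cost.

-- ===== PORT A =====
-- the blank-line test s.strip() == '' shared by both sources
def pvBlank (s : String) : Bool := PySem.Str.strip s == ""

-- 'while start < len(lines) and lines[start].strip() == "": start += 1'
def pvScanStart (lines : List String) (start : Nat) : Nat :=
  if start < lines.length ∧ pvBlank (lines.getD start "") then
    pvScanStart lines (start + 1)
  else start
termination_by lines.length - start
decreasing_by omega

-- 'while end > start and lines[end - 1].strip() == "": end -= 1'
def pvScanEnd (lines : List String) (start e : Nat) : Nat :=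
  if e > start ∧ pvBlank (lines.getD (e - 1) "") then
    pvScanEnd lines start (e - 1)
  else e
termination_by e
decreasing_by omega

def strip_empty_lines (text : String) : String :=
  let lines := (PySem.Str.split? text "\n").getD []
  let start := pvScanStart lines 0
  let e := pvScanEnd lines start lines.length
  PySem.Str.join "\n" (PySem.List.slice lines (some (start : Int)) (some (e : Int)))

-- ===== PORT B =====
-- drop_blank(ls) = list(dropwhile(lambda s: s.strip() == '', ls))
def pvDropBlank (ls : List String) : List String :=
  ls.dropWhile (fun s => PySem.Str.strip s == "")

def strip_empty_lines_alt (text : String) : String :=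
  let lines := pvDropBlank ((pvDropBlank ((PySem.Str.split? text "\n").getD []).reverse).reverse)
  PySem.Str.join "\n" lines

-- ===== PRECONDITION & SPEC =====
def Spec_strip_empty_lines (text : String) (out : String) : Prop := out = strip_empty_lines_alt text
instance (text : String) (out : String) : Decidable (Spec_strip_empty_lines text out) := by unfold Spec_strip_empty_lines; infer_instance

-- ===== CLAIM (what is proved, stated in full; the proofs are below) =====
def Claim_equal_strip_empty_lines : Prop := ∀ (text : String), Dom_strip_empty_lines text → Spec_strip_empty_lines text (strip_empty_lines text)

-- ===== LEMMAS AND PROOFS =====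

-- A's first loop lands past the blank prefix of the remaining list
theorem pvScanStart_eq (lines : List String) (i : Nat) (h : i ≤ lines.length) :
    pvScanStart lines i = i + ((lines.drop i).takeWhile pvBlank).length := by
  induction i using pvScanStart.induct (lines := lines) with
  | case1 i hc ih =>
    rw [pvScanStart, if_pos hc]
    obtain ⟨hlt, hb⟩ := hc
    rw [ih (by omega)]
    rw [List.drop_eq_getElem_cons hlt, List.takeWhile_cons,
      if_pos (by simpa [List.getD, List.getElem?_eq_getElem hlt] using hb)]
    simp; omega
  | case2 i hc =>
    rw [pvScanStart, if_neg hc]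
    rcases Nat.lt_or_ge i lines.length with hlt | hge
    · have hb : ¬ pvBlank (lines.getD i "") := fun hb => hc ⟨hlt, hb⟩
      rw [List.drop_eq_getElem_cons hlt, List.takeWhile_cons,
        if_neg (by simpa [List.getD, List.getElem?_eq_getElem hlt] using hb)]
      simp
    · have : lines.drop i = [] := List.drop_eq_nil_of_le (by omega)
      simp [this]

-- A's second loop computes rdropWhile on the slice
theorem pvScanEnd_eq (lines : List String) (s e : Nat) (hs : s ≤ e) (he : e ≤ lines.length) :
    (lines.drop s).take (pvScanEnd lines s e - s)
      = List.rdropWhile pvBlank ((lines.drop s).take (e - s)) := by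
  induction e using pvScanEnd.induct (lines := lines) (start := s) with
  | case1 e hc ih =>
    rw [pvScanEnd, if_pos hc]
    obtain ⟨hgt, hb⟩ := hc
    have h1 : e - 1 < lines.length := by omega
    have hsplit : (lines.drop s).take (e - s)
        = (lines.drop s).take (e - 1 - s) ++ [lines[e - 1]] := by
      have hidx : e - 1 - s < (lines.drop s).length := by simp; omega
      have : (lines.drop s).take (e - s) = (lines.drop s).take (e - 1 - s + 1) := by
        congr 1; omega
      rw [this, List.take_add_one, List.getElem?_eq_getElem hidx]
      simp [List.getElem_drop]
      congr 1; omega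
    rw [hsplit, List.rdropWhile_concat_pos _ _ _
      (by simpa [List.getD, List.getElem?_eq_getElem h1] using hb)]
    exact ih (by omega) (by omega)
  | case2 e hc =>
    rw [pvScanEnd, if_neg hc]
    rcases Nat.lt_or_ge s e with hlt | hge
    · have h1 : e - 1 < lines.length := by omega
      have hb : ¬ pvBlank (lines.getD (e - 1) "") := fun hb => hc ⟨hlt, hb⟩
      have hsplit : (lines.drop s).take (e - s)
          = (lines.drop s).take (e - 1 - s) ++ [lines[e - 1]] := by
        have hidx : e - 1 - s < (lines.drop s).length := by simp; omega
        have : (lines.drop s).take (e - s) = (lines.drop s).take (e - 1 - s + 1) := by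
          congr 1; omega
        rw [this, List.take_add_one, List.getElem?_eq_getElem hidx]
        simp [List.getElem_drop]
        congr 1; omega
      rw [hsplit, List.rdropWhile_concat_neg _ _ _
        (by simpa [List.getD, List.getElem?_eq_getElem h1] using hb), ← hsplit]
    · have : e = s := by omega
      simp [this]

-- dropWhile and rdropWhile commute
theorem dropWhile_rdropWhile_comm (p : String → Bool) (l : List String) :
    List.dropWhile p (List.rdropWhile p l) = List.rdropWhile p (List.dropWhile p l) := by
  induction l using List.reverseRecOn with
  | nil => simp
  | append_singleton xs x ih =>
    by_cases hp : p x
    · rw [List.rdropWhile_concat_pos _ _ _ hp, ih, List.dropWhile_append]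
      split_ifs with h
      · have h' : List.dropWhile p xs = [] := by simpa using h
        simp [h', hp]
      · rw [List.rdropWhile_concat_pos _ _ _ hp]
    · rw [List.rdropWhile_concat_neg _ _ _ hp, List.dropWhile_append]
      split_ifs with h
      · simp only [List.dropWhile_cons, hp, if_neg, Bool.false_eq_true, not_false_iff,
          List.dropWhile_nil]
        rw [show [x] = ([] : List String) ++ [x] by simp,
          List.rdropWhile_concat_neg _ _ _ hp]
      · rw [List.rdropWhile_concat_neg _ _ _ hp]

-- drop by the takeWhile length is dropWhile
theorem drop_length_takeWhile (p : String → Bool) (l : List String) :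
    l.drop (l.takeWhile p).length = l.dropWhile p := by
  induction l with
  | nil => simp
  | cons x xs ih => by_cases h : p x <;> simp [h, ih]

-- the whole list-level equivalence
theorem core_eq (lines : List String) :
    PySem.List.slice lines (some ((pvScanStart lines 0 : Nat) : Int))
        (some ((pvScanEnd lines (pvScanStart lines 0) lines.length : Nat) : Int))
      = pvDropBlank ((pvDropBlank lines.reverse).reverse) := by
  have hstart : pvScanStart lines 0 = (lines.takeWhile pvBlank).length := by
    simpa using pvScanStart_eq lines 0 (Nat.zero_le _)
  have hsle : pvScanStart lines 0 ≤ lines.length := by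
    rw [hstart]; exact (List.takeWhile_prefix pvBlank).length_le
  rw [PySem.List.slice_natCast,
    pvScanEnd_eq lines _ lines.length hsle le_rfl]
  have hdrop : lines.drop (pvScanStart lines 0) = lines.dropWhile pvBlank := by
    rw [hstart]; exact drop_length_takeWhile pvBlank lines
  have htake : (lines.drop (pvScanStart lines 0)).take (lines.length - pvScanStart lines 0)
      = lines.drop (pvScanStart lines 0) := by
    apply List.take_of_length_le; simp
  rw [htake, hdrop]
  show List.rdropWhile pvBlank (List.dropWhile pvBlank lines)
      = List.dropWhile pvBlank ((List.dropWhile pvBlank lines.reverse).reverse)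
  rw [← dropWhile_rdropWhile_comm]
  rfl

-- ===== VERDICT (by name: the statement is the Claim_ definition above) =====
theorem strip_empty_lines_spec : Claim_equal_strip_empty_lines := by
  intro text _
  show strip_empty_lines text = strip_empty_lines_alt text
  unfold strip_empty_lines strip_empty_lines_alt
  simp only []
  rw [core_eq]
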